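-- pv_equiv track=rewrite | github.com/Erik0810/NMiAI-26 | AstarIsland/archive/solve_round1.py | allocate_queries
-- ===== SOURCE A (Python) =====
-- def allocate_queries(seed_viewports_map, total_budget=50, seeds_count=5):
--     """
--     Allocate queries across seeds. Each seed gets ~10 queries.
--     Within a seed, prioritize viewports by settlement density.
--     Repeat dense viewports for better empirical distributions.
--     """
--     queries_per_seed = total_budget // seeds_count  # 10 each
--
--     all_queries = []
--     for seed_idx in range(seeds_count):
--         viewports = seed_viewports_map[seed_idx]
--         if not viewports:
--             continue
--
--         seed_queries = []
--         budget = queries_per_seed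
--
--         # First pass: cover each viewport at least once
--         for vp in viewports:
--             if budget <= 0:
--                 break
--             seed_queries.append({"seed_index": seed_idx, **vp})
--             budget -= 1
--
--         # Second pass: repeat densest viewports
--         vp_idx = 0
--         while budget > 0 and viewports:
--             vp = viewports[vp_idx % len(viewports)]
--             seed_queries.append({"seed_index": seed_idx, **vp})
--             budget -= 1
--             vp_idx += 1
--
--         all_queries.extend(seed_queries)
--
--     return all_queries
-- ===== SOURCE B (Python) =====
-- def allocate_queries(seed_viewports_map, total_budget=50, seeds_count=5):
--     """
--     Allocate queries across seeds, closed-form per seed: the sequence A emits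
--     for a seed is just the first max(queries_per_seed, 0) elements of the
--     cyclic repetition of its viewports, i.e. whole copies plus a prefix.
--     """
--     queries_per_seed = total_budget // seeds_count
--     k = max(queries_per_seed, 0)
--
--     all_queries = []
--     for seed_idx in range(seeds_count):
--         viewports = seed_viewports_map[seed_idx]
--         if not viewports:
--             continue
--         reps, rem = divmod(k, len(viewports))
--         chosen = viewports * reps + viewports[:rem]
--         all_queries.extend({"seed_index": seed_idx, **vp} for vp in chosen)
--     return all_queries
-- ===== Notes on version B (the rewrite author's own statement) =====
-- stated objective: alternative
-- what changed: Replaces the per-element budget loops (cover-once pass plus a modulo-indexed refill while-loop) with a closed-form selection per seed: divmod gives whole repetitions and a remainder, and the chosen viewports are list replication plus a slice.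
import Mathlib
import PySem

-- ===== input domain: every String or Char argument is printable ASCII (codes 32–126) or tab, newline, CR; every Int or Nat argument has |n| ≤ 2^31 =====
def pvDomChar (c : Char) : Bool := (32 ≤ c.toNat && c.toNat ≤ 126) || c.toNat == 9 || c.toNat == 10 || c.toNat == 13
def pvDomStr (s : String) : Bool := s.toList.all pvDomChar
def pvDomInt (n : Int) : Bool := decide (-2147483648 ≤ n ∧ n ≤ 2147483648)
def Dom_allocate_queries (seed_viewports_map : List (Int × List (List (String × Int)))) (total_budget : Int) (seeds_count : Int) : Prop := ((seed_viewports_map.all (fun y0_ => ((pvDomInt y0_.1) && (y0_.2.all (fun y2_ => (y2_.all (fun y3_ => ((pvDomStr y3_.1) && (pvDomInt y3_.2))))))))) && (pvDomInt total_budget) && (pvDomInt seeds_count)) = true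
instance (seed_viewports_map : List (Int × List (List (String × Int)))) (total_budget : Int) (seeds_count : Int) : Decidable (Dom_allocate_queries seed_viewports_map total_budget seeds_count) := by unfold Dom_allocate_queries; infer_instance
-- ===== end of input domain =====

-- B replaces A's two per-element budget loops by a closed-form per-seed selection
-- (whole list repetitions plus a slice); objective: alternative (same cost).

-- ===== PORT A =====
-- {"seed_index": seed_idx, **vp} : dict literal, "seed_index" inserted first, then vp's
-- items in order (overwrite in place). Shared by both ports (both sources build it this way).
def mkQuery (seed_idx : Int) (vp : List (String × Int)) : List (String × Int) :=
  (vp.foldl (fun d kv => PySem.Dict.insert d kv.1 kv.2)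
    (PySem.Dict.insert PySem.Dict.empty "seed_index" seed_idx)).items

-- first pass: cover each viewport once while budget > 0; returns (seed_queries, budget)
def firstPassA (seed_idx : Int) : List (List (String × Int)) → Int →
    List (List (String × Int)) × Int
  | [], budget => ([], budget)
  | vp :: rest, budget =>
      if budget ≤ 0 then ([], budget)
      else
        let r := firstPassA seed_idx rest (budget - 1)
        (mkQuery seed_idx vp :: r.1, r.2)

-- second pass: while budget > 0 and viewports: append viewports[vp_idx % len].
-- The loop decrements budget by exactly 1 each iteration, so fuel = budget.toNat is exact;
-- vp_idx % len is Python's % on nonnegative ints = Nat %; the index is always in range.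
def secondPassA (seed_idx : Int) (viewports : List (List (String × Int))) :
    Nat → Nat → List (List (String × Int))
  | 0, _ => []
  | fuel + 1, vp_idx =>
      if viewports = [] then []
      else
        mkQuery seed_idx (viewports.getD (vp_idx % viewports.length) []) ::
          secondPassA seed_idx viewports fuel (vp_idx + 1)

def allocate_queries (seed_viewports_map : List (Int × List (List (String × Int)))) (total_budget : Int) (seeds_count : Int) : List (List (String × Int)) :=
  let queries_per_seed := PySem.Int.floordiv total_budget seeds_count
  (PySem.List.pyRange 0 seeds_count 1).foldl (fun all_queries seed_idx =>
    -- dict lookup seed_viewports_map[seed_idx]; KeyError (none) is excluded by Pre_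
    let viewports := (seed_viewports_map.lookup seed_idx).getD []
    if viewports = [] then all_queries
    else
      let fp := firstPassA seed_idx viewports queries_per_seed
      all_queries ++ (fp.1 ++ secondPassA seed_idx viewports fp.2.toNat 0)) []

-- ===== PORT B =====
def allocate_queries_alt (seed_viewports_map : List (Int × List (List (String × Int)))) (total_budget : Int) (seeds_count : Int) : List (List (String × Int)) :=
  let queries_per_seed := PySem.Int.floordiv total_budget seeds_count
  let k := max queries_per_seed 0
  (PySem.List.pyRange 0 seeds_count 1).foldl (fun all_queries seed_idx =>
    let viewports := (seed_viewports_map.lookup seed_idx).getD []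
    if viewports = [] then all_queries
    else
      -- reps, rem = divmod(k, len(viewports)); len > 0 here
      let reps := PySem.Int.floordiv k (viewports.length : Int)
      let rem := PySem.Int.mod k (viewports.length : Int)
      -- viewports * reps (reps ≥ 0 since k ≥ 0) + viewports[:rem]
      let chosen := (List.replicate reps.toNat viewports).flatten ++
        PySem.List.slice viewports none (some rem)
      all_queries ++ chosen.map (mkQuery seed_idx)) []

-- ===== PRECONDITION & SPEC =====
-- Pre_ excludes exactly A's exceptions: seeds_count = 0 (ZeroDivisionError in
-- total_budget // seeds_count) and a seed index in range(seeds_count) missing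
-- from the dict (KeyError).
-- (stated by counting so it is decidable without enumerating range(seeds_count):
-- seeds_count distinct keys inside [0, seeds_count) means every index is present)
def Pre_allocate_queries (seed_viewports_map : List (Int × List (List (String × Int)))) (total_budget : Int) (seeds_count : Int) : Prop :=
  seeds_count ≠ 0 ∧
  (seeds_count < 0 ∨
    ((((seed_viewports_map.map Prod.fst).dedup.filter
        (fun k => 0 ≤ k ∧ k < seeds_count)).length : Int) = seeds_count))
instance (seed_viewports_map : List (Int × List (List (String × Int)))) (total_budget : Int) (seeds_count : Int) : Decidable (Pre_allocate_queries seed_viewports_map total_budget seeds_count) := by unfold Pre_allocate_queries; infer_instance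

def pvWitness_allocate_queries : (List (Int × List (List (String × Int)))) × Int × Int :=
  ([(0, [[("lat", 3), ("lon", 4)], [("lat", 5)]]), (1, [])], 7, 2)

def Spec_allocate_queries (seed_viewports_map : List (Int × List (List (String × Int)))) (total_budget : Int) (seeds_count : Int) (out : List (List (String × Int))) : Prop := out = allocate_queries_alt seed_viewports_map total_budget seeds_count
instance (seed_viewports_map : List (Int × List (List (String × Int)))) (total_budget : Int) (seeds_count : Int) (out : List (List (String × Int))) : Decidable (Spec_allocate_queries seed_viewports_map total_budget seeds_count out) := by unfold Spec_allocate_queries; infer_instance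

-- ===== CLAIM (what is proved, stated in full; the proofs are below) =====
def Claim_equal_allocate_queries : Prop := ∀ (seed_viewports_map : List (Int × List (List (String × Int)))) (total_budget : Int) (seeds_count : Int), Dom_allocate_queries seed_viewports_map total_budget seeds_count → Pre_allocate_queries seed_viewports_map total_budget seeds_count → Spec_allocate_queries seed_viewports_map total_budget seeds_count (allocate_queries seed_viewports_map total_budget seeds_count)

-- ===== LEMMAS AND PROOFS =====

-- first pass returns the first budget.toNat viewports (mapped) and the budget
-- decreased by how many it took
theorem firstPassA_eq (i : Int) :
    ∀ (V : List (List (String × Int))) (b : Int),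
      firstPassA i V b = ((V.take b.toNat).map (mkQuery i), b - (min V.length b.toNat : Nat)) := by
  intro V
  induction V with
  | nil => intro b; simp [firstPassA]
  | cons vp rest ih =>
      intro b
      by_cases hb : b ≤ 0
      · have : b.toNat = 0 := by omega
        simp [firstPassA, hb, this]
      · have hbt : b.toNat = (b - 1).toNat + 1 := by omega
        simp only [firstPassA, if_neg hb, ih (b - 1)]
        refine Prod.ext ?_ ?_
        · rw [hbt]
          simp only [List.take_succ_cons, List.map_cons]
        · simp only [List.length_cons]
          omega

-- the second pass is the cyclic stream starting at index j
theorem secondPassA_eq (i : Int) (V : List (List (String × Int))) (hV : V ≠ []) :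
    ∀ (m j : Nat),
      secondPassA i V m j =
        ((List.range m).map (fun t => V.getD ((j + t) % V.length) [])).map (mkQuery i) := by
  intro m
  induction m with
  | zero => intro j; simp [secondPassA]
  | succ m ih =>
      intro j
      rw [List.range_succ_eq_map]
      simp only [secondPassA]
      rw [if_neg hV]
      simp only [List.map_cons, List.map_map]
      congr 1
      rw [ih (j + 1), List.map_map]
      apply List.map_congr_left
      intro t _
      simp only [Function.comp_apply]
      congr 3
      omega

-- the cyclic stream of length m is whole copies of V plus a prefix
theorem stream_eq (V : List (List (String × Int))) (hV : V ≠ []) :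
    ∀ (m : Nat),
      (List.range m).map (fun t => V.getD (t % V.length) []) =
        (List.replicate (m / V.length) V).flatten ++ V.take (m % V.length) := by
  intro m
  induction m using Nat.strong_induction_on with
  | _ m ih =>
    have hL : 0 < V.length := List.length_pos_iff.mpr hV
    by_cases hm : m < V.length
    · rw [Nat.div_eq_of_lt hm, Nat.mod_eq_of_lt hm]
      simp only [List.replicate_zero, List.flatten_nil, List.nil_append]
      apply List.ext_getElem
      · simp; omega
      · intro t h1 h2
        have ht : t < V.length := by simp at h1; omega
        simp only [List.getElem_map, List.getElem_range, List.getElem_take]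
        rw [Nat.mod_eq_of_lt (by simp at h1; omega), List.getD_eq_getElem?_getD,
          List.getElem?_eq_getElem ht, Option.getD_some]
    · push_neg at hm
      have hsplit : m = V.length + (m - V.length) := by omega
      rw [hsplit, List.range_add, List.map_append, List.map_map]
      have h1 : (List.range V.length).map (fun t => V.getD (t % V.length) []) = V := by
        apply List.ext_getElem
        · simp
        · intro t ht1 ht2
          have ht : t < V.length := by simpa using ht1
          simp only [List.getElem_map, List.getElem_range]
          rw [Nat.mod_eq_of_lt ht, List.getD_eq_getElem?_getD,
            List.getElem?_eq_getElem ht, Option.getD_some]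
      have h2 : ((List.range (m - V.length)).map
            ((fun t => V.getD (t % V.length) []) ∘ (fun j => V.length + j))) =
          (List.replicate ((m - V.length) / V.length) V).flatten ++
            V.take ((m - V.length) % V.length) := by
        rw [← ih (m - V.length) (by omega)]
        apply List.map_congr_left
        intro t _
        simp [Function.comp, Nat.add_mod_left]
      rw [h1, h2]
      rw [Nat.add_div_left _ hL, Nat.add_mod_left]
      simp [List.replicate_succ, List.append_assoc]

-- A's per-seed output (take n + cyclic refill) equals B's closed form
theorem key_lemma (V : List (List (String × Int))) (hV : V ≠ []) (n : Nat) :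
    (V.take n).map (mkQuery i) ++
      ((List.range (n - min V.length n)).map (fun t => V.getD (t % V.length) [])).map (mkQuery i) =
    (((List.replicate (n / V.length) V).flatten ++ V.take (n % V.length)).map (mkQuery i)) := by
  have hL : 0 < V.length := List.length_pos_iff.mpr hV
  rw [← List.map_append]
  congr 1
  by_cases hn : n < V.length
  · rw [Nat.div_eq_of_lt hn, Nat.mod_eq_of_lt hn]
    have : n - min V.length n = 0 := by omega
    simp [this]
  · push_neg at hn
    have hmin : min V.length n = V.length := by omega
    rw [hmin, List.take_of_length_le hn, stream_eq V hV]
    have hsplit : n = V.length + (n - V.length) := by omega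
    conv_rhs => rw [hsplit]
    rw [Nat.add_div_left _ hL, Nat.add_mod_left]
    simp [List.replicate_succ, List.append_assoc]

-- per-seed step functions of the two folds agree
theorem step_eq (m : List (Int × List (List (String × Int)))) (q : Int)
    (acc : List (List (String × Int))) (seed_idx : Int) :
    (let viewports := (m.lookup seed_idx).getD []
     if viewports = [] then acc
     else
       let fp := firstPassA seed_idx viewports q
       acc ++ (fp.1 ++ secondPassA seed_idx viewports fp.2.toNat 0)) =
    (let viewports := (m.lookup seed_idx).getD []
     if viewports = [] then acc
     else
       let reps := PySem.Int.floordiv (max q 0) (viewports.length : Int)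
       let rem := PySem.Int.mod (max q 0) (viewports.length : Int)
       let chosen := (List.replicate reps.toNat viewports).flatten ++
         PySem.List.slice viewports none (some rem)
       acc ++ chosen.map (mkQuery seed_idx)) := by
  set V := (m.lookup seed_idx).getD [] with hVdef
  by_cases hV : V = []
  · simp [hV]
  · rw [if_neg hV, if_neg hV]
    have hL : 0 < V.length := List.length_pos_iff.mpr hV
    set n := q.toNat with hn
    have hk : max q 0 = ((n : Nat) : Int) := by omega
    have hreps : PySem.Int.floordiv (max q 0) (V.length : Int) = ((n / V.length : Nat) : Int) := by
      rw [hk]; exact PySem.Int.floordiv_natCast n V.length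
    have hrem : PySem.Int.mod (max q 0) (V.length : Int) = ((n % V.length : Nat) : Int) := by
      rw [hk]; exact PySem.Int.mod_natCast n V.length
    rw [firstPassA_eq]
    dsimp only
    have hfuel : (q - (min V.length q.toNat : Nat)).toNat = n - min V.length n := by omega
    rw [hfuel, secondPassA_eq seed_idx V hV]
    simp only [Nat.zero_add]
    rw [key_lemma V hV n, hreps, hrem, PySem.List.slice_to _ (by positivity)]
    simp only [Int.toNat_natCast]

-- ===== VERDICT (by name: the statement is the Claim_ definition above) =====
theorem allocate_queries_spec : Claim_equal_allocate_queries := by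
  intro m tb sc _ _
  unfold Spec_allocate_queries allocate_queries allocate_queries_alt
  apply PySem.List.foldl_congr_mem
  intro acc i _
  exact step_eq m (PySem.Int.floordiv tb sc) acc i
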